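-- pv_equiv track=rewrite | github.com/dhwpdnr/coding_test | programmers/2302/230206_2.py | solution
-- ===== SOURCE A (Python) =====
-- def solution(A, B):
--     if A == B:
--         return 0
--     for i in range(len(A)):
--         a = A[-1]
--         A = a + A[:-1]
--         if A == B:
--             return i + 1
--     return -1
-- ===== SOURCE B (Python) =====
-- def solution(A, B):
--     if A == B:
--         return 0
--     n = len(A)
--     doubled = A + A
--     for i in range(1, n):
--         if doubled[n - i:2 * n - i] == B:
--             return i
--     return -1
-- ===== Notes on version B (the rewrite author's own statement) =====
-- stated objective: alternative
-- what changed: Instead of mutating A by repeated right-rotation (rebuilding the string each step), B builds the doubled string A+A once and tests each candidate rotation as a fixed-width slice of it.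
import Mathlib
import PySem

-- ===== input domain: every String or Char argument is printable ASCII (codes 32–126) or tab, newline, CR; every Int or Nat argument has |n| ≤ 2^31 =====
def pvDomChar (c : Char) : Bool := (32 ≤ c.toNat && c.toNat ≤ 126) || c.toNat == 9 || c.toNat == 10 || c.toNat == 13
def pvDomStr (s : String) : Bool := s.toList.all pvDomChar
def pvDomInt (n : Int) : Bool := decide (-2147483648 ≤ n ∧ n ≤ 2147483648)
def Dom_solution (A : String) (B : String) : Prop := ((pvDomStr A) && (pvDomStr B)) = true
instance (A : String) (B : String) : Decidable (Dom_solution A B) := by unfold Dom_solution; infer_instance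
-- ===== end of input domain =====

-- B tests each candidate rotation as a fixed-width slice of the doubled string A+A, instead of mutating A by repeated right-rotation (alternative decomposition, same asymptotic cost).

-- ===== PORT A =====
-- loop 'for i in range(len(A))', carrying the rebound string A (as a char list) and the counter i;
-- fuel = the original len(A), fixed before the loop, exactly as range(len(A)) is.
def solutionGoA (Bl : List Char) (s : List Char) (i : Nat) : Nat → Int
  | 0 => -1
  | k + 1 =>
    match PySem.List.pyGet? s (-1) with
    | none => -1  -- IndexError on empty s; unreachable: the loop body never runs when len(A) = 0
    | some a =>
      let s' := a :: PySem.List.slice s none (some (-1))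
      if s' = Bl then (i : Int) + 1 else solutionGoA Bl s' (i + 1) k

def solution (A : String) (B : String) : Int :=
  let l := A.toList
  let bl := B.toList
  if l = bl then 0 else solutionGoA bl l 0 l.length

-- ===== PORT B =====
-- loop 'for i in range(1, n)' over the doubled string D = A + A
def solutionGoB (D : List Char) (Bl : List Char) (n : Nat) (i : Nat) : Int :=
  if i < n then
    if PySem.List.slice D (some ((n : Int) - (i : Int))) (some (2 * (n : Int) - (i : Int))) = Bl
    then (i : Int)
    else solutionGoB D Bl n (i + 1)
  else -1
termination_by n - i

def solution_alt (A : String) (B : String) : Int :=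
  let l := A.toList
  let bl := B.toList
  if l = bl then 0
  else solutionGoB (l ++ l) bl l.length 1

-- ===== PRECONDITION & SPEC =====
def Spec_solution (A : String) (B : String) (out : Int) : Prop := out = solution_alt A B
instance (A : String) (B : String) (out : Int) : Decidable (Spec_solution A B out) := by unfold Spec_solution; infer_instance

-- ===== CLAIM (what is proved, stated in full; the proofs are below) =====
def Claim_equal_solution : Prop := ∀ (A : String) (B : String), Dom_solution A B → Spec_solution A B (solution A B)

-- ===== LEMMAS AND PROOFS =====

-- one loop iteration of A on the state 'rotation by m+1' yields the state 'rotation by m'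
theorem pv_stepA (L Bl : List Char) (m : Nat) (h : m < L.length) (i k : Nat) :
    solutionGoA Bl (L.drop (m + 1) ++ L.take (m + 1)) i (k + 1)
    = if L.drop m ++ L.take m = Bl then (i : Int) + 1
      else solutionGoA Bl (L.drop m ++ L.take m) (i + 1) k := by
  have ht : L.take (m + 1) = L.take m ++ [L[m]] := by
    rw [List.take_add_one, List.getElem?_eq_getElem h]; rfl
  have hs : L.drop (m + 1) ++ L.take (m + 1) = (L.drop (m + 1) ++ L.take m) ++ [L[m]] := by
    rw [ht, List.append_assoc]
  have hd : L.drop m = L[m] :: L.drop (m + 1) := List.drop_eq_getElem_cons h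
  rw [solutionGoA, hs, PySem.List.pyGet?_neg_one_append_singleton]
  simp only [PySem.List.slice_to_neg_one, List.dropLast_concat]
  have : L[m] :: (L.drop (m + 1) ++ L.take m) = L.drop m ++ L.take m := by
    rw [hd, List.cons_append]
  rw [this]

-- the slice B takes out of the doubled string is exactly that rotation
theorem pv_sliceD (L : List Char) (m : Nat) (hm : m ≤ L.length) :
    PySem.List.slice (L ++ L) (some (m : Int)) (some ((m : Int) + (L.length : Int)))
    = L.drop m ++ L.take m := by
  rw [PySem.List.slice_natCast_add]
  rw [List.drop_append, List.take_append]
  simp [Nat.sub_sub_self hm, List.take_of_length_le, Nat.sub_eq_zero_of_le hm]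

-- the two loops, aligned: A's iteration with counter j tests the same rotation as B's index j+1
theorem pv_main (L Bl : List Char) (hne : L ≠ Bl) :
    ∀ k j, k + j = L.length →
    solutionGoA Bl (L.drop (L.length - j) ++ L.take (L.length - j)) j k
    = solutionGoB (L ++ L) Bl L.length (j + 1) := by
  intro k
  induction k with
  | zero =>
    intro j hj
    rw [solutionGoB, if_neg (by omega)]
    rfl
  | succ k ih =>
    intro j hj
    have hmlt : L.length - j - 1 < L.length := by omega
    have hrw : L.length - j = (L.length - j - 1) + 1 := by omega
    rw [hrw, pv_stepA L Bl _ hmlt j k]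
    rw [solutionGoB]
    have e1 : (L.length : Int) - ((j + 1 : Nat) : Int) = ((L.length - j - 1 : Nat) : Int) := by
      push_cast; omega
    have e2 : 2 * (L.length : Int) - ((j + 1 : Nat) : Int)
        = ((L.length - j - 1 : Nat) : Int) + (L.length : Int) := by
      push_cast; omega
    rw [e1, e2, pv_sliceD L (L.length - j - 1) (by omega)]
    by_cases hlt : j + 1 < L.length
    · rw [if_pos hlt]
      by_cases hc : L.drop (L.length - j - 1) ++ L.take (L.length - j - 1) = Bl
      · rw [if_pos hc, if_pos hc]; push_cast; ring
      · rw [if_neg hc, if_neg hc]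
        have hm2 : L.length - (j + 1) = L.length - j - 1 := by omega
        have := ih (j + 1) (by omega)
        rw [hm2] at this
        exact this
    · rw [if_neg hlt]
      have hm0 : L.length - j - 1 = 0 := by omega
      have hk0 : k = 0 := by omega
      rw [hm0, hk0]
      simp only [List.drop_zero, List.take_zero, List.append_nil]
      rw [if_neg hne]
      rfl

-- ===== VERDICT (by name: the statement is the Claim_ definition above) =====
theorem solution_spec : Claim_equal_solution := by
  intro A B _
  unfold Spec_solution solution solution_alt
  by_cases h : A.toList = B.toList
  · simp only [if_pos h]
  · simp only [if_neg h]
    have := pv_main A.toList B.toList h A.toList.length 0 (by omega)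
    rw [Nat.sub_zero, List.drop_length, List.take_length, List.nil_append] at this
    exact this
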